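-- pv_equiv track=rewrite | github.com/Turlure-Nael-23018992/SkyRank | Core/LatexMain.py | compute_max_rows
-- ===== SOURCE A (Python) =====
-- def compute_max_rows(time_dicts, attributes=[3, 6, 9]):
--     max_rows_list = []
--     for i in range(len(attributes)):
--         max_row = 0
--         for d in time_dicts:
--             for k in d:
--                 val = d[k][i] if i < len(d[k]) else None
--                 if isinstance(val, (int, float)):
--                     max_row = max(max_row, int(k))
--         max_rows_list.append(max_row)
--     return max_rows_list
-- ===== SOURCE B (Python) =====
-- def compute_max_rows(time_dicts, attributes=[3, 6, 9]):
--     n = len(attributes)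
--     # cover[L-1] = max int key among value-lists whose (n-clamped) length is exactly L
--     cover = [0] * n
--     for d in time_dicts:
--         for k, v in d.items():
--             L = min(len(v), n)
--             if L > 0:
--                 cover[L - 1] = max(cover[L - 1], int(k))
--     # suffix maxima: index i collects every list of length > i
--     for i in range(n - 2, -1, -1):
--         cover[i] = max(cover[i], cover[i + 1])
--     return cover
-- ===== Notes on version B (the rewrite author's own statement) =====
-- stated objective: faster
-- what changed: A rescans every dict and key once per attribute index; B makes one bucket pass recording the max int key per clamped value-list length, then a suffix-maximum sweep over the buckets, so each key is read (and parsed) once regardless of the number of attributes.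
import Mathlib
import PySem

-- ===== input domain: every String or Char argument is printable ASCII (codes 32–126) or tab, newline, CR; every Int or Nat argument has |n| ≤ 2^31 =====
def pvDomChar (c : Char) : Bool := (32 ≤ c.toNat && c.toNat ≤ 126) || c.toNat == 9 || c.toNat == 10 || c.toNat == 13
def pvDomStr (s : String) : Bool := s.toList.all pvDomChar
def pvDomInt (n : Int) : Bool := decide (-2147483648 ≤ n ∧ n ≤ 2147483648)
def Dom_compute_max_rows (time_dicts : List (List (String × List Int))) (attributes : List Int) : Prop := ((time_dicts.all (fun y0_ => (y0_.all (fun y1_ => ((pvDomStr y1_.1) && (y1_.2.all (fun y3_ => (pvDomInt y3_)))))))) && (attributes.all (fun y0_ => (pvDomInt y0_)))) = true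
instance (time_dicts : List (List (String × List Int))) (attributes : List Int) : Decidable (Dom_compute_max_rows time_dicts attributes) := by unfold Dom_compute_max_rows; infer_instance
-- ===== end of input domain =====

-- B replaces A's one-rescan-per-attribute with a single bucket pass (max int key per clamped value-list length) plus a suffix-maximum sweep, reading each key once instead of once per attribute.


-- int(k); exact under Pre_, which guarantees the parse succeeds wherever it is evaluated
def pvKeyInt (k : String) : Int := (PySem.Int.ofStr? k).getD 0

-- ===== PORT A =====
def compute_max_rows (time_dicts : List (List (String × List Int))) (attributes : List Int) : List Int :=
  (List.range attributes.length).map (fun i =>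
    time_dicts.foldl (fun max_row d =>
      d.foldl (fun max_row p =>
        if i < p.2.length then max max_row (pvKeyInt p.1) else max_row) max_row) 0)

-- ===== PORT B =====
def compute_max_rows_alt (time_dicts : List (List (String × List Int))) (attributes : List Int) : List Int :=
  let n := attributes.length
  let cover := time_dicts.foldl (fun cover d =>
    d.foldl (fun cover p =>
      let L := min p.2.length n
      if 0 < L then cover.set (L - 1) (max (cover.getD (L - 1) 0) (pvKeyInt p.1)) else cover)
      cover) (List.replicate n 0)
  (PySem.List.pyRange ((n : Int) - 2) (-1) (-1)).foldl (fun c i =>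
    c.set i.toNat (max (c.getD i.toNat 0) (c.getD (i.toNat + 1) 0))) cover

-- ===== PRECONDITION & SPEC =====
-- Pre_ excludes exactly the inputs where Python A raises ValueError: some dict has a
-- non-int-parsable key with a nonempty value list while attributes is nonempty (int(k) is reached there).
def Pre_compute_max_rows (time_dicts : List (List (String × List Int))) (attributes : List Int) : Prop :=
  attributes = [] ∨ ∀ d ∈ time_dicts, ∀ p ∈ d, p.2 = [] ∨ (PySem.Int.ofStr? p.1).isSome = true
instance (time_dicts : List (List (String × List Int))) (attributes : List Int) : Decidable (Pre_compute_max_rows time_dicts attributes) := by unfold Pre_compute_max_rows; infer_instance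
def pvWitness_compute_max_rows : (List (List (String × List Int))) × List Int := ([[("2", [5])], [("10", [1, 2])]], [3, 6])

def Spec_compute_max_rows (time_dicts : List (List (String × List Int))) (attributes : List Int) (out : List Int) : Prop := out = compute_max_rows_alt time_dicts attributes
instance (time_dicts : List (List (String × List Int))) (attributes : List Int) (out : List Int) : Decidable (Spec_compute_max_rows time_dicts attributes out) := by unfold Spec_compute_max_rows; infer_instance

-- ===== CLAIM (what is proved, stated in full; the proofs are below) =====
def Claim_equal_compute_max_rows : Prop := ∀ (time_dicts : List (List (String × List Int))) (attributes : List Int), Dom_compute_max_rows time_dicts attributes → Pre_compute_max_rows time_dicts attributes → Spec_compute_max_rows time_dicts attributes (compute_max_rows time_dicts attributes)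

-- ===== LEMMAS AND PROOFS =====

-- fold step of A restricted to index i (clamped form)
def pvAf (n : Nat) (P : List (String × List Int)) (i : Nat) (a : Int) : Int :=
  P.foldl (fun m p => if i + 1 ≤ min p.2.length n then max m (pvKeyInt p.1) else m) a

-- bucket value: max key over pairs whose clamped length is exactly j+1
def pvCf (n : Nat) (P : List (String × List Int)) (j : Nat) (a : Int) : Int :=
  P.foldl (fun m p => if min p.2.length n = j + 1 then max m (pvKeyInt p.1) else m) a

-- suffix maximum of the buckets from index j
def pvSuf (Cf : Nat → Int) (n j : Nat) : Int :=
  if j + 1 < n then max (Cf j) (pvSuf Cf n (j + 1)) else Cf j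
termination_by n - j

-- B's phase-1 step
def pvStep1 (n : Nat) (c : List Int) (p : String × List Int) : List Int :=
  let L := min p.2.length n
  if 0 < L then c.set (L - 1) (max (c.getD (L - 1) 0) (pvKeyInt p.1)) else c

-- both programs' nested dict/key loops are the fold over all pairs in order
lemma pv_flat {sigma : Type} (g : sigma → (String × List Int) → sigma) :
    ∀ (td : List (List (String × List Int))) (init : sigma),
    td.foldl (fun s d => d.foldl g s) init = (td.flatMap id).foldl g init := by
  intro td
  induction td with
  | nil => intro init; simp
  | cons d td ih => intro init; simp [List.foldl_append, ih]

lemma pv_getD_set (c : List Int) (k j : Nat) (v : Int) :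
    (c.set k v).getD j 0 = if k = j ∧ j < c.length then v else c.getD j 0 := by
  simp [List.getD_eq_getElem?_getD, List.getElem?_set]
  split_ifs with h1 h2 h3 <;> simp_all

lemma pvStep1_len (n : Nat) (c : List Int) (p : String × List Int) :
    (pvStep1 n c p).length = c.length := by
  simp only [pvStep1]
  split <;> simp

lemma pv_phase1_len (n : Nat) (P : List (String × List Int)) :
    ∀ c : List Int, (P.foldl (pvStep1 n) c).length = c.length := by
  induction P with
  | nil => intro c; rfl
  | cons p P ih => intro c; simp only [List.foldl_cons]; rw [ih, pvStep1_len]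

lemma pv_phase1_get (n : Nat) (P : List (String × List Int)) (j : Nat) (hj : j < n) :
    ∀ c : List Int, c.length = n →
    (P.foldl (pvStep1 n) c).getD j 0 = pvCf n P j (c.getD j 0) := by
  induction P with
  | nil => intro c _; rfl
  | cons p P ih =>
    intro c hc
    have hlen : (pvStep1 n c p).length = n := by rw [pvStep1_len, hc]
    have hstep : (pvStep1 n c p).getD j 0
        = if min p.2.length n = j + 1 then max (c.getD j 0) (pvKeyInt p.1) else c.getD j 0 := by
      simp only [pvStep1]
      by_cases hL : 0 < min p.2.length n
      · rw [if_pos hL, pv_getD_set]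
        by_cases he : min p.2.length n = j + 1
        · have : min p.2.length n - 1 = j ∧ j < c.length := by constructor <;> omega
          rw [if_pos this, if_pos he]
          have : min p.2.length n - 1 = j := by omega
          rw [this]
        · have : ¬ (min p.2.length n - 1 = j ∧ j < c.length) := by
            intro ⟨h1, _⟩; exact he (by omega)
          rw [if_neg this, if_neg he]
      · rw [if_neg hL]
        have : ¬ min p.2.length n = j + 1 := by omega
        rw [if_neg this]
    simp only [List.foldl_cons, pvCf] at *
    rw [ih _ hlen, hstep]

-- hoisting max out of A's fold
lemma pv_hoist (n : Nat) (P : List (String × List Int)) (i : Nat) :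
    ∀ a b : Int, pvAf n P i (max a b) = max (pvCf n P i a) (pvAf n P (i + 1) b) := by
  induction P with
  | nil => intro a b; rfl
  | cons p P ih =>
    intro a b
    simp only [pvAf, pvCf, List.foldl_cons] at *
    rcases Nat.lt_trichotomy (min p.2.length n) (i + 1) with h | h | h
    · rw [if_neg (show ¬ i + 1 ≤ min p.2.length n by omega),
        if_neg (show ¬ min p.2.length n = i + 1 by omega),
        if_neg (show ¬ i + 1 + 1 ≤ min p.2.length n by omega)]
      exact ih a b
    · rw [if_pos (show i + 1 ≤ min p.2.length n by omega), if_pos h,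
        if_neg (show ¬ i + 1 + 1 ≤ min p.2.length n by omega)]
      have hmx : max (max a b) (pvKeyInt p.1) = max (max a (pvKeyInt p.1)) b :=
        max_right_comm a b (pvKeyInt p.1)
      rw [hmx]
      exact ih (max a (pvKeyInt p.1)) b
    · rw [if_pos (show i + 1 ≤ min p.2.length n by omega),
        if_neg (show ¬ min p.2.length n = i + 1 by omega),
        if_pos (show i + 1 + 1 ≤ min p.2.length n by omega), max_assoc]
      exact ih a (max b (pvKeyInt p.1))

lemma pvAf_last (n : Nat) (P : List (String × List Int)) (a : Int) (hn : 0 < n) :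
    pvAf n P (n - 1) a = pvCf n P (n - 1) a := by
  induction P generalizing a with
  | nil => rfl
  | cons p P ih =>
    simp only [pvAf, pvCf, List.foldl_cons] at *
    have hmin : min p.2.length n ≤ n := min_le_right _ _
    have : (n - 1 + 1 ≤ min p.2.length n) ↔ (min p.2.length n = n - 1 + 1) := by omega
    rw [if_congr this rfl rfl]
    exact ih _

-- A's per-index value is the suffix maximum of the buckets
lemma pvAf_suf (n : Nat) (P : List (String × List Int)) :
    ∀ i : Nat, i < n → pvAf n P i 0 = pvSuf (fun j => pvCf n P j 0) n i := by
  suffices h : ∀ (d i : Nat), i + d + 1 = n → pvAf n P i 0 = pvSuf (fun j => pvCf n P j 0) n i by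
    intro i hi; exact h (n - i - 1) i (by omega)
  intro d
  induction d with
  | zero =>
    intro i hi
    rw [pvSuf, if_neg (by omega)]
    have : i = n - 1 := by omega
    subst this
    exact pvAf_last n P 0 (by omega)
  | succ d ih =>
    intro i hi
    rw [pvSuf, if_pos (by omega)]
    have h0 : pvAf n P i 0 = pvAf n P i (max 0 0) := by norm_num
    rw [h0, pv_hoist, ih (i + 1) (by omega)]

lemma pvSuf_step (Cf : Nat → Int) (n j : Nat) (h : j + 1 < n) :
    pvSuf Cf n j = max (Cf j) (pvSuf Cf n (j + 1)) := by
  rw [pvSuf, if_pos h]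

-- the suffix-maximum sweep
lemma pv_sweep (n : Nat) (Cf : Nat → Int) :
    ∀ (t : Nat) (c : List Int), c.length = n → t + 1 < n →
    (∀ j, j < n → c.getD j 0 = if t < j then pvSuf Cf n j else Cf j) →
    ∀ j, j < n →
      ((PySem.List.pyRange (t : Int) (-1) (-1)).foldl
        (fun c i => c.set i.toNat (max (c.getD i.toNat 0) (c.getD (i.toNat + 1) 0))) c).getD j 0
        = pvSuf Cf n j := by
  intro t
  induction t with
  | zero =>
    intro c hc ht hinv j hj
    rw [PySem.List.pyRange_neg_one_cons (by norm_num)]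
    simp only [Nat.cast_zero, zero_sub, Int.toNat_zero,
      PySem.List.pyRange_neg_one_eq_nil (le_refl (-1 : Int)),
      List.foldl_cons, List.foldl_nil]
    rw [pv_getD_set]
    by_cases h0 : j = 0
    · subst h0
      rw [if_pos ⟨rfl, by omega⟩, hinv 0 hj, hinv 1 ht,
          if_neg (by omega), if_pos (by omega), pvSuf_step Cf n 0 ht]
    · rw [if_neg (by intro ⟨h1, _⟩; exact h0 h1.symm), hinv j hj, if_pos (by omega)]
  | succ s ih =>
    intro c hc ht hinv j hj
    rw [PySem.List.pyRange_neg_one_cons (by omega)]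
    have hcast : ((s + 1 : Nat) : Int) - 1 = ((s : Nat) : Int) := by push_cast; ring
    simp only [List.foldl_cons, Int.toNat_natCast, hcast]
    apply ih
    · rw [List.length_set, hc]
    · omega
    · intro j' hj'
      rw [pv_getD_set]
      by_cases he : j' = s + 1
      · subst he
        rw [if_pos ⟨rfl, by omega⟩, hinv (s + 1) hj', hinv (s + 2) (by omega),
            if_neg (by omega), if_pos (by omega), if_pos (by omega),
            pvSuf_step Cf n (s + 1) (by omega)]
      · rw [if_neg (by intro ⟨h1, _⟩; exact he h1.symm), hinv j' hj']
        by_cases hlt : s < j'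
        · rw [if_pos (by omega), if_pos hlt]
        · rw [if_neg (by omega), if_neg hlt]
    · exact hj

lemma pv_sweep_len (l : List Int) :
    ∀ c : List Int,
      (l.foldl (fun c i => c.set i.toNat (max (c.getD i.toNat 0) (c.getD (i.toNat + 1) 0))) c).length
        = c.length := by
  induction l with
  | nil => intro c; rfl
  | cons x l ih => intro c; simp only [List.foldl_cons]; rw [ih, List.length_set]

-- A's unclamped length test agrees with the clamped one for i < n
lemma pvA_clamp (n : Nat) (P : List (String × List Int)) (i : Nat) (hi : i < n) :
    ∀ a : Int,
      P.foldl (fun m p => if i < p.2.length then max m (pvKeyInt p.1) else m) a = pvAf n P i a := by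
  induction P with
  | nil => intro a; rfl
  | cons p P ih =>
    intro a
    simp only [pvAf, List.foldl_cons] at *
    have hc : (i < p.2.length) ↔ (i + 1 ≤ min p.2.length n) := by omega
    rw [if_congr hc rfl rfl]
    exact ih _

lemma pv_main (td : List (List (String × List Int))) (attrs : List Int) :
    compute_max_rows td attrs = compute_max_rows_alt td attrs := by
  set n := attrs.length with hdefn
  set flat := td.flatMap id with hdefflat
  have hB : compute_max_rows_alt td attrs
      = (PySem.List.pyRange ((n : Int) - 2) (-1) (-1)).foldl
          (fun c i => c.set i.toNat (max (c.getD i.toNat 0) (c.getD (i.toNat + 1) 0)))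
          (flat.foldl (pvStep1 n) (List.replicate n 0)) := by
    simp only [compute_max_rows_alt]
    rw [pv_flat]
    rfl
  have hA : compute_max_rows td attrs
      = (List.range n).map (fun i =>
          flat.foldl (fun m p => if i < p.2.length then max m (pvKeyInt p.1) else m) 0) := by
    simp only [compute_max_rows, pv_flat]
    rfl
  have hcovlen : (flat.foldl (pvStep1 n) (List.replicate n 0)).length = n := by
    rw [pv_phase1_len, List.length_replicate]
  have hcov : ∀ j, j < n → (flat.foldl (pvStep1 n) (List.replicate n 0)).getD j 0
      = pvCf n flat j 0 := by
    intro j hj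
    rw [pv_phase1_get n flat j hj _ (List.length_replicate)]
    have h0 : (List.replicate n (0 : Int)).getD j 0 = 0 := by
      simp [List.getD_eq_getElem?_getD, hj]
    rw [h0]
  rw [hA, hB]
  apply List.ext_getElem
  · rw [List.length_map, List.length_range, pv_sweep_len, hcovlen]
  · intro i h1 h2
    have hi : i < n := by rwa [List.length_map, List.length_range] at h1
    rw [List.getElem_map, List.getElem_range, pvA_clamp n flat i hi, pvAf_suf n flat i hi,
      ← List.getD_eq_getElem _ 0]
    by_cases h2n : 2 ≤ n
    · have hcast : ((n : Int) - 2) = ((n - 2 : Nat) : Int) := by omega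
      rw [hcast]
      refine (pv_sweep n (fun j => pvCf n flat j 0) (n - 2) _ hcovlen (by omega) ?_ i hi).symm
      intro j hj
      rw [hcov j hj]
      by_cases hlast : n - 2 < j
      · have : j = n - 1 := by omega
        subst this
        rw [if_pos hlast, pvSuf, if_neg (by omega)]
      · rw [if_neg hlast]
    · have hn1 : n = 1 := by omega
      have hnil : PySem.List.pyRange ((n : Int) - 2) (-1) (-1) = [] := by
        rw [hn1]
        exact PySem.List.pyRange_neg_one_eq_nil (by norm_num)
      rw [hnil, List.foldl_nil]
      have : i = 0 := by omega
      subst this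
      rw [hcov 0 hi, pvSuf, if_neg (by omega)]

-- ===== VERDICT (by name: the statement is the Claim_ definition above) =====
theorem compute_max_rows_spec : Claim_equal_compute_max_rows := by
  intro td attrs _ _
  exact pv_main td attrs
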